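-- pv_equiv track=rewrite | github.com/benbendaisy/CommunicationCodes | python_module/examples/2340_Minimum_Adjacent_Swaps_to_Make_a_Valid_Array.py | minimumSwaps1
-- ===== SOURCE A (Python) =====
-- from typing import List
--
-- def minimumSwaps1(nums: List[int]) -> int:
--     n = len(nums)
--     if n == 1:
--         return 0
--
--     min_val = min(nums)
--     max_val = max(nums)
--
--     left_min = 0
--     while left_min < n and nums[left_min] != min_val:
--         left_min += 1
--
--     right_max = n - 1
--     while right_max >= 0 and nums[right_max] != max_val:
--         right_max -= 1
--
--     swaps = left_min + (n - 1 - right_max)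
--
--     if left_min > right_max:
--         swaps -= 1
--
--     return swaps
-- ===== SOURCE B (Python) =====
-- from typing import List
--
-- def minimumSwaps1(nums: List[int]) -> int:
--     n = len(nums)
--
--     # divide and conquer: (min, first-min-index, max, last-max-index) of nums[lo:hi)
--     def dc(lo: int, hi: int):
--         if hi - lo == 1:
--             return nums[lo], lo, nums[lo], lo
--         mid = (lo + hi) // 2
--         lmn, li, lmx, lj = dc(lo, mid)
--         rmn, ri, rmx, rj = dc(mid, hi)
--         mn, i = (lmn, li) if lmn <= rmn else (rmn, ri)
--         mx, j = (rmx, rj) if rmx >= lmx else (lmx, lj)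
--         return mn, i, mx, j
--
--     _, i, _, j = dc(0, n)
--     return i + (n - 1 - j) - (1 if i > j else 0)
-- ===== Notes on version B (the rewrite author's own statement) =====
-- stated objective: alternative
-- what changed: Replaces A's four sequential linear scans (min(), max(), a forward while loop for the first minimum, a backward while loop for the last maximum) with a divide-and-conquer recursion that computes (min, first-min-index, max, last-max-index) of each half and merges them with tie-breaking (left on equal minima, right on equal maxima).
import Mathlib
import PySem

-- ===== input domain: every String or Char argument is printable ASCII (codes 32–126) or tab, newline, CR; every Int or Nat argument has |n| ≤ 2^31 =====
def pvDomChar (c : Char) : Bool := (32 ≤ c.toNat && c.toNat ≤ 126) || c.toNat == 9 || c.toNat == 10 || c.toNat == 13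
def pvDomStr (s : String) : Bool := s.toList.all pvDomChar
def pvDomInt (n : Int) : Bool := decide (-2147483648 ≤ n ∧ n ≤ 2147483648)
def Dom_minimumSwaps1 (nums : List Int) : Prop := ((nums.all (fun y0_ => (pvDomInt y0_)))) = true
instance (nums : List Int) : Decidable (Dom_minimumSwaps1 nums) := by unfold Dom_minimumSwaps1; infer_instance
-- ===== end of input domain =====

-- B replaces A's four linear scans by a divide-and-conquer recursion computing
-- (min, first-min-index, max, last-max-index) per half and merging (objective: alternative).


-- ===== PORT A =====
-- while left_min < n and nums[left_min] != min_val: left_min += 1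
def pvWhileLeft (nums : List Int) (mv : Int) (i : Nat) : Nat :=
  if h : i < nums.length then
    if nums[i] ≠ mv then pvWhileLeft nums mv (i + 1) else i
  else i
termination_by nums.length - i

-- while right_max >= 0 and nums[right_max] != max_val: right_max -= 1
def pvWhileRight (nums : List Int) (mv : Int) (j : Int) : Int :=
  if h : 0 ≤ j ∧ j.toNat < nums.length then
    if nums[j.toNat] ≠ mv then pvWhileRight nums mv (j - 1) else j
  else j
termination_by (j + 1).toNat
decreasing_by omega

def minimumSwaps1 (nums : List Int) : Int :=
  let n := nums.length
  if n == 1 then 0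
  else
    match PySem.List.min? nums (fun x => x), PySem.List.max? nums (fun x => x) with
    | some minVal, some maxVal =>
      let leftMin := pvWhileLeft nums minVal 0
      let rightMax := pvWhileRight nums maxVal ((n : Int) - 1)
      let swaps := (leftMin : Int) + ((n : Int) - 1 - rightMax)
      if (leftMin : Int) > rightMax then swaps - 1 else swaps
    | _, _ => 0  -- unreachable: min?/max? are none only for []; Pre_ excludes []

-- ===== PORT B =====
-- dc(lo, hi): (min, first-min-index, max, last-max-index) of nums[lo:hi).
-- Python's base case is 'hi - lo == 1'; the port's 'hi ≤ lo + 1' additionally makes the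
-- degenerate hi ≤ lo calls (never reached from the entry point on nonempty input) total.
def pvDC (nums : List Int) (lo hi : Nat) : Int × Nat × Int × Nat :=
  if hi ≤ lo + 1 then (nums.getD lo 0, lo, nums.getD lo 0, lo)
  else
    let mid := (lo + hi) / 2
    let L := pvDC nums lo mid
    let R := pvDC nums mid hi
    let mni := if L.1 ≤ R.1 then (L.1, L.2.1) else (R.1, R.2.1)
    let mxj := if R.2.2.1 ≥ L.2.2.1 then (R.2.2.1, R.2.2.2) else (L.2.2.1, L.2.2.2)
    (mni.1, mni.2, mxj.1, mxj.2)
termination_by hi - lo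
decreasing_by all_goals omega

def minimumSwaps1_alt (nums : List Int) : Int :=
  let n := nums.length
  let r := pvDC nums 0 n
  let i := r.2.1
  let j := r.2.2.2
  ((i : Int) + ((n : Int) - 1 - (j : Int))) - (if j < i then 1 else 0)

-- ===== PRECONDITION & SPEC =====
-- Pre_ excludes only the empty list, on which Python's min() raises ValueError.
def Pre_minimumSwaps1 (nums : List Int) : Prop := nums ≠ []
instance (nums : List Int) : Decidable (Pre_minimumSwaps1 nums) := by unfold Pre_minimumSwaps1; infer_instance
def pvWitness_minimumSwaps1 : List Int := [3, 1, 2]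

def Spec_minimumSwaps1 (nums : List Int) (out : Int) : Prop := out = minimumSwaps1_alt nums
instance (nums : List Int) (out : Int) : Decidable (Spec_minimumSwaps1 nums out) := by unfold Spec_minimumSwaps1; infer_instance

-- ===== CLAIM (what is proved, stated in full; the proofs are below) =====
def Claim_equal_minimumSwaps1 : Prop := ∀ (nums : List Int), Dom_minimumSwaps1 nums → Pre_minimumSwaps1 nums → Spec_minimumSwaps1 nums (minimumSwaps1 nums)

-- ===== LEMMAS AND PROOFS =====

-- pvWhileLeft finds the first index holding m, given none before i holds m and m occurs from i on
theorem wl_first (nums : List Int) (m : Int) (i : Nat)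
    (hmem : m ∈ nums.drop i) (hpre : ∀ j, j < i → nums[j]? ≠ some m) :
    nums[pvWhileLeft nums m i]? = some m ∧ ∀ j, j < pvWhileLeft nums m i → nums[j]? ≠ some m := by
  fun_induction pvWhileLeft nums m i with
  | case1 i h hne ih =>
    apply ih
    · have hd : nums.drop i = nums[i] :: nums.drop (i+1) := List.drop_eq_getElem_cons h
      rw [hd] at hmem
      rcases List.mem_cons.1 hmem with h1 | h1
      · exact absurd h1.symm hne
      · exact h1
    · intro j hj
      rcases Nat.lt_or_ge j i with hji | hji
      · exact hpre j hji
      · have : j = i := by omega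
        subst this
        simp [List.getElem?_eq_getElem h]
        exact fun hc => hne hc
  | case2 i h hne =>
    rw [not_not] at hne
    subst hne
    exact ⟨List.getElem?_eq_getElem h, hpre⟩
  | case3 i h =>
    exfalso
    rw [List.drop_eq_nil_of_le (by omega)] at hmem
    exact List.not_mem_nil hmem

-- pvWhileRight finds the last index holding m, given m occurs at or before j and never after j
theorem wr_last (nums : List Int) (m : Int) (j : Int)
    (hj0 : 0 ≤ j) (hjn : j < nums.length) (hmem : m ∈ nums.take (j.toNat + 1))
    (hpost : ∀ k : Nat, j < (k : Int) → nums[k]? ≠ some m) :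
    0 ≤ pvWhileRight nums m j ∧ nums[(pvWhileRight nums m j).toNat]? = some m ∧
      ∀ k : Nat, pvWhileRight nums m j < (k : Int) → nums[k]? ≠ some m := by
  fun_induction pvWhileRight nums m j with
  | case1 j h hne ih =>
    have hlt : j.toNat < nums.length := h.2
    have htk : nums.take (j.toNat + 1) = nums.take j.toNat ++ [nums[j.toNat]] := by
      rw [List.take_add_one, List.getElem?_eq_getElem hlt]; rfl
    rw [htk, List.mem_append] at hmem
    rcases hmem with h1 | h1
    · have hj1 : 1 ≤ j := by
        rcases Int.lt_or_le j 1 with hc | hc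
        · exfalso
          have : j = 0 := by omega
          subst this
          simp at h1
        · exact hc
      apply ih (by omega) (by omega)
      · have : (j - 1).toNat + 1 = j.toNat := by omega
        rw [this]
        exact h1
      · intro k hk
        rcases Int.lt_or_le j (k : Int) with hkj | hkj
        · exact hpost k hkj
        · have : k = j.toNat := by omega
          subst this
          rw [List.getElem?_eq_getElem hlt]
          exact fun hc => hne (Option.some.inj hc)
    · simp at h1
      exact absurd h1.symm hne
  | case2 j h hne =>
    rw [not_not] at hne
    subst hne
    exact ⟨h.1, List.getElem?_eq_getElem h.2, hpost⟩
  | case3 j h =>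
    exfalso
    have : j.toNat < nums.length := by omega
    exact h ⟨hj0, this⟩

-- invariant of the divide-and-conquer: on a nonempty in-range segment [lo, hi) the result
-- is the minimum with its first index and the maximum with its last index of that segment
theorem dc_inv (nums : List Int) (lo hi : Nat) (hlo : lo < hi) (hhi : hi ≤ nums.length) :
    (lo ≤ (pvDC nums lo hi).2.1 ∧ (pvDC nums lo hi).2.1 < hi ∧
      nums[(pvDC nums lo hi).2.1]? = some (pvDC nums lo hi).1 ∧
      (∀ k, lo ≤ k → k < (pvDC nums lo hi).2.1 → nums[k]? ≠ some (pvDC nums lo hi).1) ∧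
      (∀ k, lo ≤ k → k < hi → ∀ v, nums[k]? = some v → (pvDC nums lo hi).1 ≤ v)) ∧
    (lo ≤ (pvDC nums lo hi).2.2.2 ∧ (pvDC nums lo hi).2.2.2 < hi ∧
      nums[(pvDC nums lo hi).2.2.2]? = some (pvDC nums lo hi).2.2.1 ∧
      (∀ k, (pvDC nums lo hi).2.2.2 < k → k < hi → nums[k]? ≠ some (pvDC nums lo hi).2.2.1) ∧
      (∀ k, lo ≤ k → k < hi → ∀ v, nums[k]? = some v → v ≤ (pvDC nums lo hi).2.2.1)) := by
  fun_induction pvDC nums lo hi with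
  | case1 lo hi hbase =>
    have hhe : hi = lo + 1 := by omega
    subst hhe
    have hlt : lo < nums.length := by omega
    have hg : nums.getD lo 0 = nums[lo] := List.getD_eq_getElem nums 0 hlt
    refine ⟨⟨le_refl _, by omega, ?_, ?_, ?_⟩, ⟨le_refl _, by omega, ?_, ?_, ?_⟩⟩ <;>
      simp only [hg]
    · exact List.getElem?_eq_getElem hlt
    · intro k hk1 hk2; omega
    · intro k hk1 hk2 v hv
      have : k = lo := by omega
      subst this
      rw [List.getElem?_eq_getElem hlt] at hv
      have hv' := Option.some.inj hv
      omega
    · exact List.getElem?_eq_getElem hlt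
    · intro k hk1 hk2; omega
    · intro k hk1 hk2 v hv
      have : k = lo := by omega
      subst this
      rw [List.getElem?_eq_getElem hlt] at hv
      have hv' := Option.some.inj hv
      omega
  | case2 lo hi h mid L R mni mxj ihL ihR =>
    have hmid1 : lo < mid := by omega
    have hmid2 : mid < hi := by omega
    obtain ⟨⟨hLi1, hLi2, hLget, hLfirst, hLmin⟩, hLj1, hLj2, hLgetM, hLlast, hLmax⟩ :=
      ihL hmid1 (by omega)
    obtain ⟨⟨hRi1, hRi2, hRget, hRfirst, hRmin⟩, hRj1, hRj2, hRgetM, hRlast, hRmax⟩ :=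
      ihR hmid2 hhi
    constructor
    · -- min half
      dsimp only
      simp only [mni]
      by_cases hc : L.1 ≤ R.1
      · rw [dif_pos hc]
        refine ⟨hLi1, lt_trans hLi2 hmid2, hLget, ?_, ?_⟩
        · exact fun k hk1 hk2 => hLfirst k hk1 hk2
        · intro k hk1 hk2 v hv
          rcases Nat.lt_or_ge k mid with hkm | hkm
          · exact hLmin k hk1 hkm v hv
          · exact le_trans hc (hRmin k hkm hk2 v hv)
      · rw [dif_neg hc]
        refine ⟨le_trans (Nat.le_of_lt hmid1) hRi1, hRi2, hRget, ?_, ?_⟩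
        · intro k hk1 hk2
          rcases Nat.lt_or_ge k mid with hkm | hkm
          · exact fun hcon => hc (hLmin k hk1 hkm R.1 hcon)
          · exact hRfirst k hkm hk2
        · intro k hk1 hk2 v hv
          rcases Nat.lt_or_ge k mid with hkm | hkm
          · exact le_of_lt (lt_of_lt_of_le (not_le.mp hc) (hLmin k hk1 hkm v hv))
          · exact hRmin k hkm hk2 v hv
    · -- max half
      dsimp only
      simp only [mxj]
      by_cases hd : R.2.2.1 ≥ L.2.2.1
      · rw [dif_pos hd]
        refine ⟨le_trans (Nat.le_of_lt hmid1) hRj1, hRj2, hRgetM, ?_, ?_⟩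
        · exact fun k hk1 hk2 => hRlast k hk1 hk2
        · intro k hk1 hk2 v hv
          rcases Nat.lt_or_ge k mid with hkm | hkm
          · exact le_trans (hLmax k hk1 hkm v hv) hd
          · exact hRmax k hkm hk2 v hv
      · rw [dif_neg hd]
        refine ⟨hLj1, lt_trans hLj2 hmid2, hLgetM, ?_, ?_⟩
        · intro k hk1 hk2
          rcases Nat.lt_or_ge k mid with hkm | hkm
          · exact hLlast k hk1 hkm
          · exact fun hcon => hd (hRmax k hkm hk2 L.2.2.1 hcon)
        · intro k hk1 hk2 v hv
          rcases Nat.lt_or_ge k mid with hkm | hkm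
          · exact hLmax k hk1 hkm v hv
          · exact le_of_lt (lt_of_le_of_lt (hRmax k hkm hk2 v hv) (not_le.mp hd))

-- ===== VERDICT (by name: the statement is the Claim_ definition above) =====
theorem minimumSwaps1_spec : Claim_equal_minimumSwaps1 := by
  intro nums _ hpre
  unfold Spec_minimumSwaps1
  have hn0 : nums.length ≠ 0 := by simpa [List.length_eq_zero_iff] using hpre
  obtain ⟨⟨hi1, hi2, higet, hifirst, himin⟩, hj1, hj2, hjget, hjlast, hjmax⟩ :=
    dc_inv nums 0 nums.length (by omega) (le_refl _)
  set r := pvDC nums 0 nums.length with hr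
  rcases hmin? : PySem.List.min? nums (fun x => x) with _ | minVal
  · exact absurd ((PySem.List.min?_eq_none_iff _ _).1 hmin?) hpre
  rcases hmax? : PySem.List.max? nums (fun x => x) with _ | maxVal
  · exact absurd ((PySem.List.max?_eq_none_iff _ _).1 hmax?) hpre
  have hminmem : ∀ x ∈ nums, r.1 ≤ x := by
    intro x hx
    obtain ⟨k, hk, hkx⟩ := List.getElem_of_mem hx
    exact himin k (Nat.zero_le _) hk x (by rw [List.getElem?_eq_getElem hk, hkx])
  have hmaxmem : ∀ x ∈ nums, x ≤ r.2.2.1 := by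
    intro x hx
    obtain ⟨k, hk, hkx⟩ := List.getElem_of_mem hx
    exact hjmax k (Nat.zero_le _) hk x (by rw [List.getElem?_eq_getElem hk, hkx])
  have hminVal : minVal = r.1 :=
    le_antisymm (PySem.List.min?_isMin hmin? _ (List.mem_of_getElem? higet))
      (hminmem _ (PySem.List.min?_mem hmin?))
  have hmaxVal : maxVal = r.2.2.1 :=
    le_antisymm (hmaxmem _ (PySem.List.max?_mem hmax?))
      (PySem.List.max?_isMax hmax? _ (List.mem_of_getElem? hjget))
  subst hminVal hmaxVal
  -- A's forward scan lands on B's first-min index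
  obtain ⟨hwl1, hwl2⟩ := wl_first nums r.1 0
    (by simpa using PySem.List.min?_mem hmin?) (by intro j hj; omega)
  have hwlEq : pvWhileLeft nums r.1 0 = r.2.1 := by
    rcases lt_trichotomy (pvWhileLeft nums r.1 0) r.2.1 with hc | hc | hc
    · exact absurd hwl1 (hifirst _ (Nat.zero_le _) hc)
    · exact hc
    · exact absurd higet (hwl2 _ hc)
  -- A's backward scan lands on B's last-max index
  obtain ⟨hwr0, hwr1, hwr2⟩ := wr_last nums r.2.2.1 ((nums.length : Int) - 1)
    (by omega) (by omega)
    (by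
      have : (((nums.length : Int) - 1).toNat + 1) = nums.length := by omega
      rw [this, List.take_length]
      exact PySem.List.max?_mem hmax?)
    (by
      intro k hk
      rw [List.getElem?_eq_none (by omega)]
      simp)
  have hwrEq : pvWhileRight nums r.2.2.1 ((nums.length : Int) - 1) = (r.2.2.2 : Int) := by
    rcases lt_trichotomy (pvWhileRight nums r.2.2.1 ((nums.length : Int) - 1)).toNat r.2.2.2
      with hc | hc | hc
    · exact absurd hjget (hwr2 _ (by omega))
    · omega
    · have hlt := (List.getElem?_eq_some_iff.1 hwr1).1
      exact absurd hwr1 (hjlast _ hc hlt)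
  by_cases hn1 : nums.length = 1
  · have hl0 : r.2.1 = 0 := by omega
    have hr0 : r.2.2.2 = 0 := by omega
    simp only [minimumSwaps1, minimumSwaps1_alt, ← hr]
    rw [if_pos (by simp [hn1]), hl0, hr0, hn1]
    norm_num
  · simp only [minimumSwaps1, minimumSwaps1_alt, hmin?, hmax?, hwlEq, hwrEq, ← hr,
      beq_iff_eq, if_neg hn1]
    split_ifs with h1 h2 h2 <;> push_cast at h1 h2 ⊢ <;> omega
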